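-- pv_equiv track=rewrite | github.com/pypi-data/pypi-mirror-382 | packages/cooplot/cooplot-0.1.1.tar.gz/cooplot-0.1.1/cooplot/metrics.py | _authors_match
-- ===== SOURCE A (Python) =====
-- from typing import Callable, Dict, Iterable, List, Optional, Tuple
--
-- def _author_tokens(name: str) -> set[str]:
--     tokens = [tok.strip(".,") for tok in (name or "").split() if tok.strip(".,")]
--     lowered = {tok.lower() for tok in tokens if len(tok) > 1}
--     if len(tokens) >= 2:
--         lowered.add(tokens[0].lower())
--         lowered.add(tokens[-1].lower())
--     return lowered
--
-- def _authors_match(local_authors: Iterable[str], pubmed_authors: Iterable[str]) -> bool: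
--     local_lists = [
--         _author_tokens(name)
--         for name in local_authors
--         if isinstance(name, str) and name.strip()
--     ]
--     pubmed_tokens = set()
--     for name in pubmed_authors:
--         if isinstance(name, str) and name.strip():
--             pubmed_tokens.update(_author_tokens(name))
--     if not local_lists or not pubmed_tokens:
--         return True
--     return any(
--         tokens and not tokens.isdisjoint(pubmed_tokens) for tokens in local_lists
--     )
-- ===== SOURCE B (Python) =====
-- def _author_tokens(name):
--     tokens = [tok.strip(".,") for tok in (name or "").split() if tok.strip(".,")]
--     lowered = {tok.lower() for tok in tokens if len(tok) > 1}
--     if len(tokens) >= 2: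
--         lowered.add(tokens[0].lower())
--         lowered.add(tokens[-1].lower())
--     return lowered
--
-- def _authors_match(local_authors, pubmed_authors):
--     pubmed_tokens = set()
--     for name in pubmed_authors:
--         if isinstance(name, str) and name.strip():
--             pubmed_tokens.update(_author_tokens(name))
--     has_local = False
--     local_union = set()
--     for name in local_authors:
--         if isinstance(name, str) and name.strip():
--             has_local = True
--             local_union |= _author_tokens(name)
--     if not has_local or not pubmed_tokens:
--         return True
--     return bool(local_union & pubmed_tokens)
-- ===== Notes on version B (the rewrite author's own statement) =====
-- stated objective: simpler
-- what changed: Replaces the list of per-author token sets plus the any/isdisjoint scan by a single fold that unions all local token sets and one intersection test (union intersects pubmed iff some author's tokens do; empty token sets add nothing to the union).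
import Mathlib
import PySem

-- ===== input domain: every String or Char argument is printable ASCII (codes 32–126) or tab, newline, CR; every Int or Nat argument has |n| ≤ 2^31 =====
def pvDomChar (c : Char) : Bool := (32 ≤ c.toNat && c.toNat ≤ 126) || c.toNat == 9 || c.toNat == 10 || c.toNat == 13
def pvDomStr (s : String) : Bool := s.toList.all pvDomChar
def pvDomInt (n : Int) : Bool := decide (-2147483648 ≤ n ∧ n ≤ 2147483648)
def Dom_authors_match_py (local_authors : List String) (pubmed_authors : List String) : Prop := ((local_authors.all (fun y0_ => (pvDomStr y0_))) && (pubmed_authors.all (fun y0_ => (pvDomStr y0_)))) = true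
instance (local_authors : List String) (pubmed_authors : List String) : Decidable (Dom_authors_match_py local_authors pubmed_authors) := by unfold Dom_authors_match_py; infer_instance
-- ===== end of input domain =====

-- B folds all local authors' token sets into one union and tests a single intersection,
-- instead of A's list of per-author sets scanned with any/isdisjoint (simpler decomposition).


-- ===== PORT A =====
-- shared helper _author_tokens (identical in Source A and Source B)
def authorTokens (name : String) : PySem.Set String :=
  let tokens := ((PySem.Str.split₀ name).map (fun tok => PySem.Str.stripChars tok ".,")).filter
    (fun tok => !(tok == ""))
  let lowered := PySem.Set.ofList
    ((tokens.filter (fun tok => 1 < PySem.Str.len tok)).map PySem.Str.lower)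
  if 2 ≤ tokens.length then
    PySem.Set.add (PySem.Set.add lowered (PySem.Str.lower (tokens.headD "")))
      (PySem.Str.lower (tokens.getLastD ""))
  else lowered

def authors_match_py (local_authors : List String) (pubmed_authors : List String) : Bool :=
  let local_lists := (local_authors.filter (fun name => !(PySem.Str.strip name == ""))).map authorTokens
  let pubmed_tokens := pubmed_authors.foldl
    (fun s name => if !(PySem.Str.strip name == "") then PySem.Set.update s (authorTokens name) else s)
    PySem.Set.empty
  if local_lists.isEmpty || pubmed_tokens.isEmpty then true
  else local_lists.any (fun tokens => !tokens.isEmpty && !(PySem.Set.isdisjoint tokens pubmed_tokens))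

-- ===== PORT B =====
def authors_match_py_alt (local_authors : List String) (pubmed_authors : List String) : Bool :=
  let pubmed_tokens := pubmed_authors.foldl
    (fun s name => if !(PySem.Str.strip name == "") then PySem.Set.update s (authorTokens name) else s)
    PySem.Set.empty
  let st := local_authors.foldl
    (fun (p : Bool × PySem.Set String) name =>
      if !(PySem.Str.strip name == "") then (true, PySem.Set.union p.2 (authorTokens name)) else p)
    (false, PySem.Set.empty)
  if !st.1 || pubmed_tokens.isEmpty then true
  else !(PySem.Set.inter st.2 pubmed_tokens).isEmpty

-- ===== PRECONDITION & SPEC =====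
def Spec_authors_match_py (local_authors : List String) (pubmed_authors : List String) (out : Bool) : Prop := out = authors_match_py_alt local_authors pubmed_authors
instance (local_authors : List String) (pubmed_authors : List String) (out : Bool) : Decidable (Spec_authors_match_py local_authors pubmed_authors out) := by unfold Spec_authors_match_py; infer_instance

-- ===== CLAIM (what is proved, stated in full; the proofs are below) =====
def Claim_equal_authors_match_py : Prop := ∀ (local_authors : List String) (pubmed_authors : List String), Dom_authors_match_py local_authors pubmed_authors → Spec_authors_match_py local_authors pubmed_authors (authors_match_py local_authors pubmed_authors)

-- ===== LEMMAS AND PROOFS =====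

-- B's single fold: flag = some kept author exists; union = all kept authors' tokens
lemma foldB_spec (locs : List String) (b : Bool) (u : PySem.Set String) :
    (locs.foldl
      (fun (p : Bool × PySem.Set String) name =>
        if !(PySem.Str.strip name == "") then (true, PySem.Set.union p.2 (authorTokens name)) else p)
      (b, u)).1
      = (b || !((locs.filter (fun name => !(PySem.Str.strip name == ""))).isEmpty)) ∧
    ∀ x, x ∈ (locs.foldl
      (fun (p : Bool × PySem.Set String) name =>
        if !(PySem.Str.strip name == "") then (true, PySem.Set.union p.2 (authorTokens name)) else p)
      (b, u)).2
      ↔ x ∈ u ∨ ∃ t ∈ (locs.filter (fun name => !(PySem.Str.strip name == ""))).map authorTokens, x ∈ t := by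
  induction locs generalizing b u with
  | nil => simp
  | cons hd tl ih =>
    by_cases h : (PySem.Str.strip hd == "") = true
    · simp only [List.foldl_cons, List.filter_cons, h, Bool.not_true, Bool.false_eq_true,
        if_false]
      exact ih b u
    · have h' : (!(PySem.Str.strip hd == "")) = true := by simp_all
      simp only [List.foldl_cons, List.filter_cons, h', if_true]
      obtain ⟨ih1, ih2⟩ := ih true (PySem.Set.union u (authorTokens hd))
      constructor
      · rw [ih1]; simp
      · intro x
        rw [ih2 x]
        simp only [PySem.Set.mem_union, List.map_cons, List.mem_cons]
        constructor
        · rintro ((hx | hx) | ⟨t, ht, hxt⟩)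
          · exact Or.inl hx
          · exact Or.inr ⟨authorTokens hd, Or.inl rfl, hx⟩
          · exact Or.inr ⟨t, Or.inr ht, hxt⟩
        · rintro (hx | ⟨t, ht | ht, hxt⟩)
          · exact Or.inl (Or.inl hx)
          · exact Or.inl (Or.inr (ht ▸ hxt))
          · exact Or.inr ⟨t, ht, hxt⟩

-- ===== VERDICT (by name: the statement is the Claim_ definition above) =====
theorem authors_match_py_spec : Claim_equal_authors_match_py := by
  intro locs pubs _
  unfold Spec_authors_match_py authors_match_py authors_match_py_alt
  dsimp only
  obtain ⟨h1, h2⟩ := foldB_spec locs false PySem.Set.empty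
  simp only [Bool.false_or] at h1
  rw [h1, Bool.not_not, List.isEmpty_map]
  set pub := List.foldl
    (fun s name => if !(PySem.Str.strip name == "") then PySem.Set.update s (authorTokens name) else s)
    PySem.Set.empty pubs with hpub
  set st := List.foldl
    (fun (p : Bool × PySem.Set String) name =>
      if !(PySem.Str.strip name == "") then (true, PySem.Set.union p.2 (authorTokens name)) else p)
    (false, PySem.Set.empty) locs with hst
  set F := List.filter (fun name => !(PySem.Str.strip name == "")) locs with hF
  by_cases hE : (F.isEmpty || pub.isEmpty) = true
  · rw [if_pos hE, if_pos hE]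
  · rw [if_neg hE, if_neg hE]
    rw [Bool.eq_iff_iff]
    simp only [List.any_eq_true, Bool.and_eq_true, Bool.not_eq_true', List.isEmpty_eq_false_iff]
    constructor
    · rintro ⟨t, htL, -, hdis⟩
      have hx : ¬ (∀ x ∈ t, x ∉ pub) := by
        rw [← PySem.Set.isdisjoint_iff, hdis]; simp
      push Not at hx
      obtain ⟨x, hxt, hxp⟩ := hx
      have hxi : x ∈ PySem.Set.inter st.2 pub := by
        rw [PySem.Set.mem_inter]
        exact ⟨(h2 x).2 (Or.inr ⟨t, htL, hxt⟩), hxp⟩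
      intro hnil
      rw [hnil] at hxi
      simp at hxi
    · intro hne
      obtain ⟨x, hx⟩ := List.exists_mem_of_ne_nil _ hne
      rw [PySem.Set.mem_inter] at hx
      rcases (h2 x).1 hx.1 with hxe | ⟨t, htL, hxt⟩
      · exact absurd hxe (by simp [PySem.Set.empty])
      · refine ⟨t, htL, ?_, ?_⟩
        · intro h0
          rw [h0] at hxt
          simp at hxt
        · rw [Bool.eq_false_iff, Ne, PySem.Set.isdisjoint_iff]
          push Not
          exact ⟨x, hxt, hx.2⟩
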